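-- pv_equiv track=rewrite | github.com/juglab/napari-denoiseg | src/napari_denoiseg/utils/denoiseg_utils.py | are_axes_valid
-- ===== SOURCE A (Python) =====
-- REF_AXES = 'TSZYXC'
--
-- def are_axes_valid(axes: str):
--     _axes = axes.upper()
--
--     # length 0 and >6 are not accepted
--     if 0 > len(_axes) > 6:
--         return False
--
--     # all characters must be in REF_AXES = 'STZYXC'
--     if not all([s in REF_AXES for s in _axes]):
--         return False
--
--     # check for repeating characters
--     for i, s in enumerate(_axes):
--         if i != _axes.rfind(s):
--             return False
--
--     return True
-- ===== SOURCE B (Python) =====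
-- REF_AXES = 'TSZYXC'
--
-- def are_axes_valid(axes: str):
--     _axes = axes.upper()
--     return set(_axes) <= set(REF_AXES) and len(set(_axes)) == len(_axes)
-- ===== Notes on version B (the rewrite author's own statement) =====
-- stated objective: simpler
-- what changed: Replaced A's per-character membership scan and O(n^2) rfind-based duplicate-detection loop with two set comparisons (set(_axes) <= set(REF_AXES) and len(set(_axes)) == len(_axes)), and dropped A's length check since its chained condition 0 > len > 6 is unsatisfiable and never rejects anything.
import Mathlib
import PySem

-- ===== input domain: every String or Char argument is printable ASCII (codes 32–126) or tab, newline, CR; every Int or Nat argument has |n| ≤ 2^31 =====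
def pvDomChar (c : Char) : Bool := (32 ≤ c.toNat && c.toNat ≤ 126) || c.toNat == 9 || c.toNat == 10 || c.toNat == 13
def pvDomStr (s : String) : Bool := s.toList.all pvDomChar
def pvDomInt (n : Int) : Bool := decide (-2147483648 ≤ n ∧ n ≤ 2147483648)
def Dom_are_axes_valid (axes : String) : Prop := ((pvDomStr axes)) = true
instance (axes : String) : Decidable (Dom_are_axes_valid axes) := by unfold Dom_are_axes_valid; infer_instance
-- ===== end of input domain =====

-- B replaces A's per-character membership scan and O(n²) rfind duplicate loop by two set
-- comparisons (subset of REF_AXES, set size = length), dropping A's unsatisfiable length check.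

-- ===== PORT A =====
def REF_AXES : String := "TSZYXC"

def are_axes_valid (axes : String) : Bool :=
  let _axes := PySem.Chars.upper axes.toList
  -- length 0 and >6 are not accepted  (chained comparison 0 > len(_axes) > 6, ported literally)
  if 0 > PySem.Chars.len _axes ∧ PySem.Chars.len _axes > 6 then false
  -- all characters must be in REF_AXES
  else if !((_axes.map (fun s => PySem.Chars.isIn [s] REF_AXES.toList)).all id) then false
  -- check for repeating characters: 'for i, s in enumerate(_axes): if i != _axes.rfind(s): return False'
  else if (PySem.List.enumerate _axes).any (fun p => !(p.1 == PySem.Chars.rfind _axes [p.2])) then false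
  else true

-- ===== PORT B =====
def are_axes_valid_alt (axes : String) : Bool :=
  let _axes := PySem.Chars.upper axes.toList
  let st : PySem.Set Char := PySem.Set.ofList _axes
  PySem.Set.issubset st (PySem.Set.ofList REF_AXES.toList) && (PySem.Set.len st == _axes.length)

-- ===== PRECONDITION & SPEC =====
def Spec_are_axes_valid (axes : String) (out : Bool) : Prop := out = are_axes_valid_alt axes
instance (axes : String) (out : Bool) : Decidable (Spec_are_axes_valid axes out) := by unfold Spec_are_axes_valid; infer_instance

-- ===== CLAIM (what is proved, stated in full; the proofs are below) =====
def Claim_equal_are_axes_valid : Prop := ∀ (axes : String), Dom_are_axes_valid axes → Spec_are_axes_valid axes (are_axes_valid axes)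

-- ===== LEMMAS AND PROOFS =====

-- [c] is a prefix of s.drop i exactly when s[i] is c
theorem prefix_singleton (s : List Char) (c : Char) (i : Nat) :
    [c].isPrefixOf (s.drop i) = true ↔ s[i]? = some c := by
  rw [← List.head?_drop, List.isPrefixOf_iff_prefix]
  cases s.drop i with
  | nil => simp
  | cons b bs => simp [List.cons_prefix_cons, eq_comm]

-- rfind.go's two defining equations (structural recursion, by rfl)
theorem go_zero (s sub : List Char) :
    PySem.Chars.rfind.go s sub 0 = if sub.isPrefixOf s = true then 0 else -1 := rfl

theorem go_succ (s sub : List Char) (j : Nat) :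
    PySem.Chars.rfind.go s sub (j+1) =
      if sub.isPrefixOf (s.drop (j+1)) = true then ((j+1 : Nat) : Int)
      else PySem.Chars.rfind.go s sub j := rfl

-- rfind.go scans indices j, j-1, …, 0: its result is at least any index ≤ j holding c
theorem go_ge (s : List Char) (c : Char) (k : Nat) (hs : s[k]? = some c) :
    ∀ j, k ≤ j → (k : Int) ≤ PySem.Chars.rfind.go s [c] j := by
  intro j
  induction j with
  | zero =>
    intro hk
    have hk0 : k = 0 := Nat.le_zero.mp hk
    subst hk0
    have hp := (prefix_singleton s c 0).2 hs
    rw [List.drop_zero] at hp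
    rw [go_zero, hp]
    simp
  | succ j ih =>
    intro hk
    rw [go_succ]
    by_cases hp : [c].isPrefixOf (s.drop (j+1)) = true
    · rw [if_pos hp]
      exact_mod_cast hk
    · rw [if_neg hp]
      have hne : k ≠ j + 1 := fun h => hp ((prefix_singleton s c (j+1)).2 (h ▸ hs))
      exact ih (by omega)

-- with a unique occurrence at k below j, rfind.go returns k
theorem go_eq (s : List Char) (c : Char) (k : Nat) (hs : s[k]? = some c)
    (hmax : ∀ i, i ≠ k → s[i]? ≠ some c) :
    ∀ j, k ≤ j → PySem.Chars.rfind.go s [c] j = (k : Int) := by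
  intro j
  induction j with
  | zero =>
    intro hk
    have hk0 : k = 0 := Nat.le_zero.mp hk
    subst hk0
    have hp := (prefix_singleton s c 0).2 hs
    rw [List.drop_zero] at hp
    rw [go_zero, hp]
    simp
  | succ j ih =>
    intro hk
    rw [go_succ]
    by_cases hp : [c].isPrefixOf (s.drop (j+1)) = true
    · rw [if_pos hp]
      have h1 := (prefix_singleton s c (j+1)).1 hp
      by_cases hjk : j + 1 = k
      · exact_mod_cast hjk
      · exact absurd h1 (hmax _ hjk)
    · rw [if_neg hp]
      have hne : k ≠ j + 1 := fun h => hp ((prefix_singleton s c (j+1)).2 (h ▸ hs))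
      exact ih (by omega)

-- A's duplicate-detection loop succeeds exactly on duplicate-free lists
theorem dupcheck (cs : List Char) :
    ((PySem.List.enumerate cs).any (fun p => !(p.1 == PySem.Chars.rfind cs [p.2])) = false) ↔ cs.Nodup := by
  rw [List.any_eq_false]
  constructor
  · intro h
    rw [List.nodup_iff_getElem?_ne_getElem?]
    by_contra hdup
    rw [not_forall] at hdup
    obtain ⟨i, hdup⟩ := hdup
    rw [not_forall] at hdup
    obtain ⟨j, hdup⟩ := hdup
    rw [not_forall] at hdup
    obtain ⟨hij, hdup⟩ := hdup
    rw [not_forall] at hdup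
    obtain ⟨hjlen, hdup⟩ := hdup
    rw [not_not] at hdup
    have heq := hdup
    have hi : i < cs.length := lt_trans hij hjlen
    have hmem : ((i : Int), cs[i]) ∈ PySem.List.enumerate cs := by
      rw [PySem.List.mem_enumerate_iff]
      exact ⟨i, hi, by simp⟩
    have hall := h _ hmem
    simp only [Bool.not_eq_true', Bool.not_eq_false, beq_iff_eq] at hall
    have hsj : cs[j]? = some cs[i] := by
      rw [List.getElem?_eq_getElem hi] at heq
      exact heq.symm
    have hge := go_ge cs cs[i] j hsj cs.length (le_of_lt hjlen)
    rw [PySem.Chars.rfind] at hall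
    omega
  · intro hnd p hp
    rw [PySem.List.mem_enumerate_iff] at hp
    obtain ⟨k, hk, rfl⟩ := hp
    simp only [Bool.not_eq_true', Bool.not_eq_false, beq_iff_eq, zero_add]
    rw [PySem.Chars.rfind]
    refine (go_eq cs cs[k] k (by simp) ?_ cs.length (le_of_lt hk)).symm
    intro i hik hi
    rcases Nat.lt_or_ge i cs.length with hilen | hilen
    · rw [List.getElem?_eq_getElem hilen] at hi
      have heq : cs[i] = cs[k] := by injection hi
      rw [List.nodup_iff_getElem?_ne_getElem?] at hnd
      rcases Nat.lt_or_ge i k with hlt | hge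
      · exact hnd i k hlt hk (by rw [List.getElem?_eq_getElem hilen, List.getElem?_eq_getElem hk, heq])
      · exact hnd k i (by omega) hilen (by rw [List.getElem?_eq_getElem hilen, List.getElem?_eq_getElem hk, heq])
    · rw [List.getElem?_eq_none hilen] at hi
      simp at hi

-- Python's set(xs) (first occurrences in order) is a sublist of xs
theorem ofList_sublist (cs : List Char) : (PySem.Set.ofList cs).Sublist cs := by
  induction cs using List.reverseRecOn with
  | nil => simp [PySem.Set.ofList_nil]
  | append_singleton xs x ih =>
    rw [PySem.Set.ofList_append_singleton, PySem.Set.add_eq_ite]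
    split
    · exact ih.trans (List.sublist_append_left xs [x])
    · exact List.Sublist.append ih (List.Sublist.refl [x])

-- |set(xs)| = |xs| exactly when xs has no duplicates
theorem set_len_eq_iff (cs : List Char) :
    (PySem.Set.ofList cs).length = cs.length ↔ cs.Nodup := by
  constructor
  · intro h
    have := (ofList_sublist cs).eq_of_length h
    rw [← this]
    exact PySem.Set.nodup_ofList cs
  · intro h
    rw [PySem.Set.ofList_eq_self_of_nodup cs h]

-- A's per-character membership test equals B's subset test
theorem memcheck (cs : List Char) :
    ((cs.map (fun s => PySem.Chars.isIn [s] REF_AXES.toList)).all id = true)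
      ↔ PySem.Set.issubset (PySem.Set.ofList cs) (PySem.Set.ofList REF_AXES.toList) = true := by
  rw [PySem.Set.issubset_iff]
  simp only [List.all_eq_true, List.mem_map, id, forall_exists_index, and_imp]
  constructor
  · intro h x hx
    rw [PySem.Set.mem_ofList] at hx ⊢
    have := h _ x hx rfl
    rw [PySem.Chars.isIn_iff_infix] at this
    exact (List.singleton_sublist.mp this.sublist)
  · intro h b c hc hbc
    subst hbc
    rw [PySem.Chars.isIn_iff_infix]
    have hc' : c ∈ PySem.Set.ofList REF_AXES.toList := h c ((PySem.Set.mem_ofList _ _).mpr hc)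
    rw [PySem.Set.mem_ofList] at hc'
    obtain ⟨pre, suf, hps⟩ := List.append_of_mem hc'
    exact ⟨pre, suf, by simpa using hps.symm⟩
  
-- ===== VERDICT (by name: the statement is the Claim_ definition above) =====
theorem are_axes_valid_spec : Claim_equal_are_axes_valid := by
  intro axes _
  unfold Spec_are_axes_valid are_axes_valid are_axes_valid_alt
  set cs := PySem.Chars.upper axes.toList with hcs
  simp only [PySem.Chars.len]
  rw [if_neg (by omega)]
  cases hm : (cs.map (fun s => PySem.Chars.isIn [s] REF_AXES.toList)).all id with
  | false =>
    have hsub : PySem.Set.issubset (PySem.Set.ofList cs) (PySem.Set.ofList REF_AXES.toList) = false := by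
      rw [Bool.eq_false_iff]
      intro h
      rw [← memcheck cs] at h
      rw [hm] at h
      exact Bool.noConfusion h
    simp [hsub]
  | true =>
    have hsub := (memcheck cs).mp hm
    cases hany : (PySem.List.enumerate cs).any (fun p => !(p.1 == PySem.Chars.rfind cs [p.2])) with
    | false =>
      have hnd := (dupcheck cs).mp hany
      have hlen := (set_len_eq_iff cs).mpr hnd
      simp [hsub, PySem.Set.len, hlen]
    | true =>
      have hnd : ¬ cs.Nodup := by
        intro h
        have := (dupcheck cs).mpr h
        rw [hany] at this
        exact Bool.noConfusion this
      have hlen : (PySem.Set.ofList cs).length ≠ cs.length := fun h => hnd ((set_len_eq_iff cs).mp h)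
      simp [hsub, PySem.Set.len, hlen]
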